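-- pv_equiv track=rewrite | github.com/spicylemonade/AI_research | src/tokenizer.py | get_tree_depths
-- ===== SOURCE A (Python) =====
-- from typing import List, Optional, Tuple, Dict
--
-- OPERATOR_ARITY = {
--     '+': 2, '-': 2, '*': 2, '/': 2, '^': 2,
--     'neg': 1,
--     'sin': 1, 'cos': 1, 'tan': 1,
--     'asin': 1, 'acos': 1, 'atan': 1,
--     'sinh': 1, 'cosh': 1, 'tanh': 1,
--     'exp': 1, 'log': 1, 'ln': 1, 'sqrt': 1, 'abs': 1,
-- }
--
-- def get_tree_depths(tokens: List[str]) -> List[int]: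
--     """Compute the expression tree depth for each token in prefix notation.
--
--     This is used for the dual-axis positional encoding (sequence position + tree depth).
--
--     Args:
--         tokens: List of tokens in prefix notation
--
--     Returns:
--         List of tree depths (0-indexed from root)
--     """
--     depths = []
--     stack = []  # Stack of (remaining_children, depth) pairs
--
--     for tok in tokens:
--         if stack:
--             current_depth = stack[-1][1] + 1
--         else:
--             current_depth = 0
--
--         depths.append(current_depth)
--
--         arity = OPERATOR_ARITY.get(tok, 0)
--         if arity > 0:
--             # Operator: push expected children count
--             stack.append([arity, current_depth])
--         else:
--             # Leaf: consume from parent chain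
--             while stack:
--                 stack[-1][0] -= 1
--                 if stack[-1][0] == 0:
--                     stack.pop()
--                 else:
--                     break
--
--     return depths
-- ===== SOURCE B (Python) =====
-- OPERATOR_ARITY = {
--     '+': 2, '-': 2, '*': 2, '/': 2, '^': 2,
--     'neg': 1,
--     'sin': 1, 'cos': 1, 'tan': 1,
--     'asin': 1, 'acos': 1, 'atan': 1,
--     'sinh': 1, 'cosh': 1, 'tanh': 1,
--     'exp': 1, 'log': 1, 'ln': 1, 'sqrt': 1, 'abs': 1,
-- }
--
-- def get_tree_depths(tokens):
--     depths = []
--     agenda = []  # depths waiting for the tokens still to come; innermost last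
--     for tok in tokens:
--         depth = agenda.pop() if agenda else 0
--         depths.append(depth)
--         agenda.extend([depth + 1] * OPERATOR_ARITY.get(tok, 0))
--     return depths
-- ===== Notes on version B (the rewrite author's own statement) =====
-- stated objective: simpler
-- what changed: Replaced A's stack of mutable [remaining_children, depth] pairs with its cascading decrement-and-pop loop by an agenda list holding the depths of tokens still expected: pop one depth per token (default 0) and push arity copies of depth+1.
import Mathlib
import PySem

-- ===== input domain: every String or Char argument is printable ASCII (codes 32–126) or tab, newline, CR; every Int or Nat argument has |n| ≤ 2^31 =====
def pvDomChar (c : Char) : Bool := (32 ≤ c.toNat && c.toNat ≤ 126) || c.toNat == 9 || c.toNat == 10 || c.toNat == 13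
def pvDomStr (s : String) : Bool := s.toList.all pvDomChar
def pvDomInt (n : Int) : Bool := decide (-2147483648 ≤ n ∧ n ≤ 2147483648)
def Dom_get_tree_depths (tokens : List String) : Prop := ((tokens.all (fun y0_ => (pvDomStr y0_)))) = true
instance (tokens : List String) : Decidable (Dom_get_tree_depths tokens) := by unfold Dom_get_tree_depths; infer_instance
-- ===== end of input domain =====

-- B replaces A's (remaining_children, depth)-pair stack and its cascading decrement loop
-- by an agenda list of pending child depths, for a shorter, plainer single pass (same cost).

-- ===== PORT A =====
def OPERATOR_ARITY : PySem.Dict String Int := PySem.Dict.ofList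
  [("+", 2), ("-", 2), ("*", 2), ("/", 2), ("^", 2),
   ("neg", 1),
   ("sin", 1), ("cos", 1), ("tan", 1),
   ("asin", 1), ("acos", 1), ("atan", 1),
   ("sinh", 1), ("cosh", 1), ("tanh", 1),
   ("exp", 1), ("log", 1), ("ln", 1), ("sqrt", 1), ("abs", 1)]

-- A's inner `while stack:` cascade on a leaf: decrement the top count; pop it and continue
-- while it reaches 0, otherwise stop.  (Stack modelled top-first.)
def consumeA : List (Int × Int) → List (Int × Int)
  | [] => []
  | (c, d) :: rest => if c - 1 = 0 then consumeA rest else (c - 1, d) :: rest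

-- `stack[-1][1] + 1 if stack else 0`
def curDepthA : List (Int × Int) → Int
  | [] => 0
  | (_, dep) :: _ => dep + 1

-- A's `for tok in tokens:` loop; `depths.append` becomes the cons of each depth.
def loopA : List String → List (Int × Int) → List Int
  | [], _ => []
  | t :: ts, stack =>
    if PySem.Dict.getD OPERATOR_ARITY t 0 > 0 then
      curDepthA stack :: loopA ts ((PySem.Dict.getD OPERATOR_ARITY t 0, curDepthA stack) :: stack)
    else
      curDepthA stack :: loopA ts (consumeA stack)

def get_tree_depths (tokens : List String) : List Int := loopA tokens []

-- ===== PORT B =====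
-- B's loop: pop a depth from the agenda (or 0), emit it, push arity copies of depth+1.
-- (Agenda modelled top-first: pop = headD/tail, extend = prepend.)
def loopB : List String → List Int → List Int
  | [], _ => []
  | t :: ts, agenda =>
    agenda.headD 0 ::
      loopB ts (List.replicate (PySem.Dict.getD OPERATOR_ARITY t 0).toNat (agenda.headD 0 + 1)
                  ++ agenda.tail)

def get_tree_depths_alt (tokens : List String) : List Int := loopB tokens []

-- ===== PRECONDITION & SPEC =====
def Spec_get_tree_depths (tokens : List String) (out : List Int) : Prop := out = get_tree_depths_alt tokens
instance (tokens : List String) (out : List Int) : Decidable (Spec_get_tree_depths tokens out) := by unfold Spec_get_tree_depths; infer_instance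

-- ===== CLAIM (what is proved, stated in full; the proofs are below) =====
def Claim_equal_get_tree_depths : Prop := ∀ (tokens : List String), Dom_get_tree_depths tokens → Spec_get_tree_depths tokens (get_tree_depths tokens)

-- ===== LEMMAS AND PROOFS =====

-- Encoding of A's stack as B's agenda: the top frame contributes all `c` of its pending
-- child depths, every lower frame contributes `c - 1` (one child is currently open).
def encT : List (Int × Int) → List Int
  | [] => []
  | (c, d) :: rest => List.replicate (c - 1).toNat (d + 1) ++ encT rest

def enc : List (Int × Int) → List Int
  | [] => []
  | (c, d) :: rest => List.replicate c.toNat (d + 1) ++ encT rest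

-- A's stack invariant: counts ≥ 1 and depths |rest|, |rest|-1, …, 0 from the top.
def InvA : List (Int × Int) → Prop
  | [] => True
  | (c, d) :: rest => 1 ≤ c ∧ d = (rest.length : Int) ∧ InvA rest

lemma enc_cons (c d : Int) (rest : List (Int × Int)) (hc : 1 ≤ c) :
    enc ((c, d) :: rest) = (d + 1) :: encT ((c, d) :: rest) := by
  have h1 : c.toNat = (c - 1).toNat + 1 := by omega
  rw [enc, encT, h1, List.replicate_succ, List.cons_append]

lemma headD_enc (s : List (Int × Int)) (hs : InvA s) : (enc s).headD 0 = curDepthA s := by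
  cases s with
  | nil => rfl
  | cons p rest =>
    obtain ⟨c, d⟩ := p
    rw [enc_cons c d rest hs.1, curDepthA, List.headD_cons]

lemma tail_enc (s : List (Int × Int)) (hs : InvA s) : (enc s).tail = encT s := by
  cases s with
  | nil => rfl
  | cons p rest =>
    obtain ⟨c, d⟩ := p
    rw [enc_cons c d rest hs.1, List.tail_cons]

lemma enc_consumeA (s : List (Int × Int)) : enc (consumeA s) = encT s := by
  induction s with
  | nil => rfl
  | cons p rest ih =>
    obtain ⟨c, d⟩ := p
    by_cases h : c - 1 = 0
    · have hstep : consumeA ((c, d) :: rest) = consumeA rest := by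
        rw [consumeA, if_pos h]
      have h0 : (c - 1).toNat = 0 := by omega
      rw [hstep, ih, encT, h0, List.replicate_zero, List.nil_append]
    · rw [consumeA, if_neg h, enc, encT]

lemma invA_consumeA (s : List (Int × Int)) (hs : InvA s) : InvA (consumeA s) := by
  induction s with
  | nil => exact trivial
  | cons p rest ih =>
    obtain ⟨c, d⟩ := p
    obtain ⟨hc, hd, hrest⟩ := hs
    by_cases h : c - 1 = 0
    · rw [consumeA, if_pos h]; exact ih hrest
    · rw [consumeA, if_neg h]; exact ⟨by omega, hd, hrest⟩

lemma curDepthA_eq_length (s : List (Int × Int)) (hs : InvA s) :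
    curDepthA s = (s.length : Int) := by
  cases s with
  | nil => rfl
  | cons p rest =>
    obtain ⟨c, d⟩ := p
    rw [curDepthA, hs.2.1, List.length_cons]
    push_cast
    ring

lemma loopA_eq_loopB (ts : List String) :
    ∀ s, InvA s → loopA ts s = loopB ts (enc s) := by
  induction ts with
  | nil => intro s _; rfl
  | cons t ts ih =>
    intro s hs
    rw [loopB, headD_enc s hs, tail_enc s hs]
    by_cases har : PySem.Dict.getD OPERATOR_ARITY t 0 > 0
    · have hinv : InvA ((PySem.Dict.getD OPERATOR_ARITY t 0, curDepthA s) :: s) :=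
        ⟨by omega, curDepthA_eq_length s hs, hs⟩
      rw [loopA, if_pos har, ih _ hinv, enc]
    · have h0 : (PySem.Dict.getD OPERATOR_ARITY t 0).toNat = 0 := by omega
      rw [loopA, if_neg har, ih _ (invA_consumeA s hs), enc_consumeA, h0,
        List.replicate_zero, List.nil_append]

-- ===== VERDICT (by name: the statement is the Claim_ definition above) =====
theorem get_tree_depths_spec : Claim_equal_get_tree_depths := by
  intro tokens _
  show get_tree_depths tokens = get_tree_depths_alt tokens
  exact loopA_eq_loopB tokens [] trivial
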